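-- pv_equiv track=rewrite | github.com/aydincalikoglu/Algorithms_DivideAndConquer | subarray_finder_141044078.py | crossMin
-- ===== SOURCE A (Python) =====
-- def crossMin(arr):
--     start=0
--     size=len(arr)
--     halfSize=(int)(len(arr)/2)
--
--     newArray=[]
--     sum = 0;
--     leftSum = float('inf');
--     for i in reversed(range(0,halfSize)):
--         sum = sum + arr[i];
--         if (sum < leftSum):
--             leftSum = sum;
--             newArray.insert(0,arr[i])
--
--
--     sum = 0;
--     rightSum = float('inf');
--     for i in range(halfSize,size):
--         sum = sum + arr[i];
--         if (sum < rightSum):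
--             rightSum = sum;
--             newArray.append(arr[i])
--
--     return newArray
-- ===== SOURCE B (Python) =====
-- def crossMin(arr):
--     n = len(arr)
--     half = n // 2
--
--     # Global prefix-sum table: P[k] = arr[0] + ... + arr[k-1], P[0] = 0.
--     P = [0]
--     for v in arr:
--         P.append(P[-1] + v)
--
--     # Left half: arr[i] (0 <= i < half) belongs to the answer iff its suffix
--     # sum arr[i]+...+arr[half-1] = P[half]-P[i] is a strict record, i.e. iff
--     # P[i] > P[j] for every j with i < j < half.  Precompute the suffix-max
--     # table of P[:half] and select with a stateless filter.
--     leftP = P[:half]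
--     tails = []                      # tails[i] = max(leftP[i+1:]) or None
--     m = None
--     for q in reversed(leftP):
--         tails.append(m)
--         if m is None or q > m:
--             m = q
--     tails.reverse()
--     left = [v for (v, p, t) in zip(arr[:half], leftP, tails)
--             if t is None or p > t]
--
--     # Right half: arr[i] (half <= i < n) belongs iff P[half]..P[i] sums give a
--     # strict minimum, i.e. P[i+1] < P[j] for every j with half < j <= i.
--     rightP = P[half + 1:]
--     heads = []                      # heads[k] = min(rightP[:k]) or None
--     m = None
--     for q in rightP:
--         heads.append(m)
--         if m is None or q < m:
--             m = q
--     right = [v for (v, p, h) in zip(arr[half:], rightP, heads)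
--              if h is None or p < h]
--
--     return left + right
-- ===== Notes on version B (the rewrite author's own statement) =====
-- stated objective: alternative
-- what changed: A fuses scanning and selecting: two stateful running-minimum loops over element sums (backward over the left half with insert(0), forward over the right). B instead builds the single global prefix-sum table P of the whole array, characterizes kept elements as strict one-sided records of P (left: P[i] strictly greater than every later P[j] of the half; right: P[i+1] strictly smaller than every earlier one), precomputes a suffix-max table for the left and a prefix-min table for the right, and selects by stateless zip-filters, both halves in increasing index order.
import Mathlib
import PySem

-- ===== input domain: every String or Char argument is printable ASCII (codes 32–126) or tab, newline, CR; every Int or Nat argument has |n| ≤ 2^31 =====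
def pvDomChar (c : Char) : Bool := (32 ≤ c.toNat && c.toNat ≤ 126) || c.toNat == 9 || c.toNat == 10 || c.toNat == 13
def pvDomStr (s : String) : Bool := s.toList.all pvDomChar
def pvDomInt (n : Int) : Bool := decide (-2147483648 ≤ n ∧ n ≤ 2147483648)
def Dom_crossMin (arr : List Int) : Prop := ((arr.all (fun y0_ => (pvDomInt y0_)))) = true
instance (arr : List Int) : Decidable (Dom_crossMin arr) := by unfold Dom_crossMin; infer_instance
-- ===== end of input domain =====

-- B replaces A's two fused stateful running-minimum scans over element sums by a different
-- formulation: build the single global prefix-sum table P once, characterize kept elements as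
-- strict one-sided records of P (left: P[i] greater than every later P[j] of the half; right:
-- P[i+1] smaller than every earlier one), precompute a suffix-max / prefix-min table, and
-- select with stateless zip-filters (alternative algorithmic formulation, same cost class).

-- ===== PORT A =====
-- float('inf') initial leftSum/rightSum is modelled as Option Int: none = inf (sum < inf always true).
def crossMin (arr : List Int) : List Int :=
  let size : Int := (arr.length : Int)
  -- int(len(arr)/2): len ≥ 0, so truncating division = floor division
  let halfSize : Int := PySem.Int.floordiv size 2
  -- for i in reversed(range(0, halfSize)): sum += arr[i]; if sum < leftSum: leftSum = sum; newArray.insert(0, arr[i])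
  let st1 := ((PySem.List.pyRange 0 halfSize 1).reverse).foldl
      (fun (st : Int × Option Int × List Int) i =>
        let s := st.1 + PySem.List.pyGetD arr i 0
        match st.2.1 with
        | none => (s, some s, PySem.List.pyGetD arr i 0 :: st.2.2)
        | some m => if s < m then (s, some s, PySem.List.pyGetD arr i 0 :: st.2.2) else (s, some m, st.2.2))
      (0, none, [])
  -- for i in range(halfSize, size): sum += arr[i]; if sum < rightSum: rightSum = sum; newArray.append(arr[i])
  let st2 := (PySem.List.pyRange halfSize size 1).foldl
      (fun (st : Int × Option Int × List Int) i =>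
        let s := st.1 + PySem.List.pyGetD arr i 0
        match st.2.1 with
        | none => (s, some s, st.2.2 ++ [PySem.List.pyGetD arr i 0])
        | some m => if s < m then (s, some s, st.2.2 ++ [PySem.List.pyGetD arr i 0]) else (s, some m, st.2.2))
      (0, none, st1.2.2)
  st2.2.2

-- ===== PORT B =====
-- helpers of B's port: the table-update steps ('if m is None or q > m: m = q' / the < twin)
def updMax (m : Option Int) (q : Int) : Option Int :=
  match m with | none => some q | some m' => if q > m' then some q else some m'
def updMin (m : Option Int) (q : Int) : Option Int :=
  match m with | none => some q | some m' => if q < m' then some q else some m'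

def crossMin_alt (arr : List Int) : List Int :=
  let n := arr.length
  let half := n / 2
  -- global prefix-sum table: P = [0]; for v in arr: P.append(P[-1] + v)
  let P := arr.foldl (fun acc v => acc ++ [acc.getLast! + v]) [0]
  -- left: suffix-max table of P[:half], then a stateless filter (strict records)
  let leftP := P.take half
  let tails := ((leftP.reverse.foldl
      (fun (st : Option Int × List (Option Int)) q => (updMax st.1 q, st.2 ++ [st.1]))
      (none, [])).2).reverse
  let left := ((arr.take half).zip (leftP.zip tails)).filterMap
      (fun p => match p.2.2 with | none => some p.1 | some t => if p.2.1 > t then some p.1 else none)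
  -- right: prefix-min table of P[half+1:], then a stateless filter
  let rightP := P.drop (half + 1)
  let heads := (rightP.foldl
      (fun (st : Option Int × List (Option Int)) q => (updMin st.1 q, st.2 ++ [st.1]))
      (none, [])).2
  let right := ((arr.drop half).zip (rightP.zip heads)).filterMap
      (fun p => match p.2.2 with | none => some p.1 | some h => if p.2.1 < h then some p.1 else none)
  left ++ right

-- ===== PRECONDITION & SPEC =====
def Spec_crossMin (arr : List Int) (out : List Int) : Prop := out = crossMin_alt arr
instance (arr : List Int) (out : List Int) : Decidable (Spec_crossMin arr out) := by unfold Spec_crossMin; infer_instance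

-- ===== CLAIM (what is proved, stated in full; the proofs are below) =====
def Claim_equal_crossMin : Prop := ∀ (arr : List Int), Dom_crossMin arr → Spec_crossMin arr (crossMin arr)

-- ===== LEMMAS AND PROOFS =====

-- the fused step A's two loops reduce to (append-order accumulator)
def fusedStep (st : Int × Option Int × List Int) (v : Int) : Int × Option Int × List Int :=
  match st.2.1 with
  | none => (st.1 + v, some (st.1 + v), st.2.2 ++ [v])
  | some m => if st.1 + v < m then (st.1 + v, some (st.1 + v), st.2.2 ++ [v]) else (st.1 + v, some m, st.2.2)

-- A's left-loop step (insert(0, ·))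
def consStep (st : Int × Option Int × List Int) (v : Int) : Int × Option Int × List Int :=
  match st.2.1 with
  | none => (st.1 + v, some (st.1 + v), v :: st.2.2)
  | some m => if st.1 + v < m then (st.1 + v, some (st.1 + v), v :: st.2.2) else (st.1 + v, some m, st.2.2)

-- running prefix sums starting from t
def sumsFrom (t : Int) : List Int → List Int
  | [] => []
  | v :: vs => (t + v) :: sumsFrom (t + v) vs

-- extremum table: entry k = accumulator value before absorbing element k
def hTab (upd : Option Int → Int → Option Int) : Option Int → List Int → List (Option Int)
  | _, [] => []
  | m, q :: qs => m :: hTab upd (upd m q) qs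

-- the two stateless selectors of B
def selLT (p : Int × Int × Option Int) : Option Int :=
  match p.2.2 with | none => some p.1 | some h => if p.2.1 < h then some p.1 else none
def selGT (p : Int × Int × Option Int) : Option Int :=
  match p.2.2 with | none => some p.1 | some t => if p.2.1 > t then some p.1 else none

theorem fusedStep_none (s v : Int) (acc : List Int) :
    fusedStep (s, none, acc) v = (s + v, some (s + v), acc ++ [v]) := rfl
theorem fusedStep_some (s m v : Int) (acc : List Int) :
    fusedStep (s, some m, acc) v =
      if s + v < m then (s + v, some (s + v), acc ++ [v]) else (s + v, some m, acc) := rfl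
theorem consStep_none (s v : Int) (acc : List Int) :
    consStep (s, none, acc) v = (s + v, some (s + v), v :: acc) := rfl
theorem consStep_some (s m v : Int) (acc : List Int) :
    consStep (s, some m, acc) v =
      if s + v < m then (s + v, some (s + v), v :: acc) else (s + v, some m, acc) := rfl

theorem fused_acc (L : List Int) (s : Int) (m : Option Int) (acc : List Int) :
    L.foldl fusedStep (s, m, acc) =
      ((L.foldl fusedStep (s, m, []) ).1, (L.foldl fusedStep (s, m, []) ).2.1,
        acc ++ (L.foldl fusedStep (s, m, []) ).2.2) := by
  induction L generalizing s m acc with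
  | nil => simp
  | cons v L ih =>
    cases m with
    | none =>
      simp only [List.foldl_cons, fusedStep_none, List.nil_append]
      rw [ih (acc := acc ++ [v]), ih (acc := [v])]
      simp
    | some m' =>
      simp only [List.foldl_cons, fusedStep_some, List.nil_append]
      by_cases h : s + v < m'
      · simp only [if_pos h]
        rw [ih (acc := acc ++ [v]), ih (acc := [v])]
        simp
      · simp only [if_neg h]
        rw [ih (acc := acc)]

theorem cons_eq_rev_fused (L : List Int) (s : Int) (m : Option Int) (acc : List Int) :
    (L.foldl consStep (s, m, acc)).2.2 =
      (L.foldl fusedStep (s, m, []) ).2.2.reverse ++ acc := by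
  induction L generalizing s m acc with
  | nil => simp
  | cons v L ih =>
    cases m with
    | none =>
      simp only [List.foldl_cons, consStep_none, fusedStep_none, List.nil_append]
      rw [ih (acc := v :: acc), fused_acc L _ _ [v]]
      simp
    | some m' =>
      simp only [List.foldl_cons, consStep_some, fusedStep_some, List.nil_append]
      by_cases h : s + v < m'
      · simp only [if_pos h]
        rw [ih (acc := v :: acc), fused_acc L _ _ [v]]
        simp
      · simp only [if_neg h]
        rw [ih (acc := acc)]

theorem map_getD_range_take (arr : List Int) (h : Nat) (hle : h ≤ arr.length) :
    (PySem.List.pyRange 0 (h : Int) 1).map (fun j => PySem.List.pyGetD arr j 0) = arr.take h := by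
  induction h with
  | zero => simp
  | succ n ih =>
    have hn : n < arr.length := by omega
    have h1 : ((n + 1 : Nat) : Int) = (n : Int) + 1 := by push_cast; ring
    rw [h1, PySem.List.pyRange_one_succ_right (by positivity), List.map_append,
        ih (by omega), List.map_singleton, PySem.List.pyGetD_natCast]
    rw [List.take_add_one, List.getElem?_eq_getElem hn, List.getD_eq_getElem _ _ hn]
    rfl

-- ===== B-side lemmas =====

-- fused scan = zip-filter against the prefix-min table of the running sums
theorem fused_table (vals : List Int) (t : Int) (m : Option Int) (acc : List Int) :
    (vals.foldl fusedStep (t, m, acc)).2.2 =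
      acc ++ (vals.zip ((sumsFrom t vals).zip (hTab updMin m (sumsFrom t vals)))).filterMap selLT := by
  induction vals generalizing t m acc with
  | nil => simp
  | cons v vs ih =>
    cases m with
    | none =>
      simp only [List.foldl_cons, fusedStep_none, sumsFrom, hTab, updMin, List.zip_cons_cons,
        List.filterMap_cons, selLT]
      rw [ih]
      simp
      rfl
    | some m' =>
      simp only [List.foldl_cons, fusedStep_some, sumsFrom, hTab, updMin, List.zip_cons_cons,
        List.filterMap_cons, selLT]
      by_cases h : t + v < m'
      · simp only [if_pos h]
        rw [ih]
        simp
        rfl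
      · simp only [if_neg h]
        rw [ih]
        rfl

-- the table-building fold computes hTab
theorem tab_fold (upd : Option Int → Int → Option Int) (qs : List Int) (m : Option Int)
    (acc : List (Option Int)) :
    (qs.foldl (fun (st : Option Int × List (Option Int)) q => (upd st.1 q, st.2 ++ [st.1]))
        (m, acc)).2 = acc ++ hTab upd m qs := by
  induction qs generalizing m acc with
  | nil => simp [hTab]
  | cons q qs ih => simp only [List.foldl_cons, hTab]; rw [ih]; simp

theorem length_sumsFrom (t : Int) (vs : List Int) : (sumsFrom t vs).length = vs.length := by
  induction vs generalizing t with
  | nil => rfl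
  | cons v vs ih => simp [sumsFrom, ih]

theorem length_hTab (upd : Option Int → Int → Option Int) (m : Option Int) (qs : List Int) :
    (hTab upd m qs).length = qs.length := by
  induction qs generalizing m with
  | nil => rfl
  | cons q qs ih => simp [hTab, ih]

theorem sumsFrom_append (t : Int) (a b : List Int) :
    sumsFrom t (a ++ b) = sumsFrom t a ++ sumsFrom (t + a.sum) b := by
  induction a generalizing t with
  | nil => simp [sumsFrom]
  | cons v a ih =>
    simp only [List.cons_append, sumsFrom, List.sum_cons, ih]
    have : t + v + a.sum = t + (v + a.sum) := by ring
    rw [this]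

theorem sumsFrom_take (t : Int) (vs : List Int) (k : Nat) :
    (sumsFrom t vs).take k = sumsFrom t (vs.take k) := by
  induction vs generalizing t k with
  | nil => simp [sumsFrom]
  | cons v vs ih =>
    cases k with
    | zero => simp [sumsFrom]
    | succ k => simp [sumsFrom, ih]

theorem sumsFrom_add (c t : Int) (vs : List Int) :
    sumsFrom (c + t) vs = (sumsFrom t vs).map (fun s => c + s) := by
  induction vs generalizing t with
  | nil => rfl
  | cons v vs ih =>
    simp only [sumsFrom, List.map_cons, List.cons.injEq]
    constructor
    · ring
    · have : c + t + v = c + (t + v) := by ring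
      rw [this, ih]

theorem sumsFrom_ofs (c : Int) (vs : List Int) :
    sumsFrom c vs = (sumsFrom 0 vs).map (fun s => c + s) := by
  have := sumsFrom_add c 0 vs
  simpa using this

-- prefix sums of the reverse: the dropLast of (c :: sums) reversed is total-minus-suffix-sums
theorem revSums (vs : List Int) (c : Int) :
    ((c :: sumsFrom c vs).dropLast).reverse =
      (sumsFrom 0 vs.reverse).map (fun s => (c + vs.sum) - s) := by
  induction vs generalizing c with
  | nil => simp [sumsFrom]
  | cons v ws ih =>
    simp only [sumsFrom, List.sum_cons, List.reverse_cons]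
    have hne : ((c + v) :: sumsFrom (c + v) ws) ≠ [] := by simp
    rw [List.dropLast_cons_of_ne_nil hne, List.reverse_cons, ih (c + v),
        sumsFrom_append, List.map_append]
    congr 1
    · apply List.map_congr_left
      intro s _
      ring
    · simp [sumsFrom, List.sum_reverse]
      ring

-- max table over (c - ·)-mapped values = mapped min table
theorem hTab_max_of_min (qs : List Int) (m : Option Int) (c : Int) :
    hTab updMax (m.map (fun s => c - s)) (qs.map (fun s => c - s)) =
      (hTab updMin m qs).map (Option.map (fun s => c - s)) := by
  induction qs generalizing m with
  | nil => simp [hTab]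
  | cons q qs ih =>
    simp only [List.map_cons, hTab, List.cons.injEq]
    refine ⟨trivial, ?_⟩
    have hupd : updMax (m.map (fun s => c - s)) (c - q) = (updMin m q).map (fun s => c - s) := by
      cases m with
      | none => rfl
      | some m' =>
        by_cases h : q < m'
        · simp [updMax, updMin, h, (by omega : c - q > c - m')]
        · simp [updMax, updMin, h]
    rw [hupd, ih]

-- min table over (c + ·)-mapped values = mapped min table
theorem hTab_min_add (qs : List Int) (m : Option Int) (c : Int) :
    hTab updMin (m.map (fun s => c + s)) (qs.map (fun s => c + s)) =
      (hTab updMin m qs).map (Option.map (fun s => c + s)) := by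
  induction qs generalizing m with
  | nil => simp [hTab]
  | cons q qs ih =>
    simp only [List.map_cons, hTab, List.cons.injEq]
    refine ⟨trivial, ?_⟩
    have hupd : updMin (m.map (fun s => c + s)) (c + q) = (updMin m q).map (fun s => c + s) := by
      cases m with
      | none => rfl
      | some m' =>
        by_cases h : q < m'
        · simp [updMin, h, (by omega : c + q < c + m')]
        · simp [updMin, h]
    rw [hupd, ih]

-- the selectors are invariant under the corresponding order-preserving/reversing offsets
theorem sel_gt_sub (vs qs : List Int) (hs : List (Option Int)) (c : Int) :
    (vs.zip ((qs.map (fun s => c - s)).zip (hs.map (Option.map (fun s => c - s))))).filterMap selGT =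
      (vs.zip (qs.zip hs)).filterMap selLT := by
  rw [List.zip_map, List.zip_map_right, List.filterMap_map]
  apply List.filterMap_congr
  intro p _
  obtain ⟨v, s, h⟩ := p
  cases h with
  | none => rfl
  | some m =>
    by_cases hc : s < m
    · simp [Prod.map, selGT, selLT, hc, (by omega : c - s > c - m)]
    · simp [Prod.map, selGT, selLT, hc]

theorem sel_lt_add (vs qs : List Int) (hs : List (Option Int)) (c : Int) :
    (vs.zip ((qs.map (fun s => c + s)).zip (hs.map (Option.map (fun s => c + s))))).filterMap selLT =
      (vs.zip (qs.zip hs)).filterMap selLT := by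
  rw [List.zip_map, List.zip_map_right, List.filterMap_map]
  apply List.filterMap_congr
  intro p _
  obtain ⟨v, s, h⟩ := p
  cases h with
  | none => rfl
  | some m =>
    by_cases hc : s < m
    · simp [Prod.map, selLT, hc, (by omega : c + s < c + m)]
    · simp [Prod.map, selLT, hc]

theorem zip_rev {α β : Type} (a : List α) (b : List β) (h : a.length = b.length) :
    (a.zip b).reverse = a.reverse.zip b.reverse := by
  induction a generalizing b with
  | nil => simp
  | cons x a ih =>
    cases b with
    | nil => simp at h
    | cons y b =>
      simp only [List.zip_cons_cons, List.reverse_cons]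
      rw [ih b (by simpa using h), List.zip_append (by simp at h; simp; omega)]
      simp

-- P[-1] for the nonempty accumulator
theorem getLast_concat' (l : List Int) (a : Int) : (l ++ [a]).getLast! = a :=
  List.getLast!_of_getLast? (by simp)

-- the prefix-table fold builds 0 :: sumsFrom 0 arr
theorem pFold (arr : List Int) (acc : List Int) (c : Int) :
    arr.foldl (fun acc v => acc ++ [acc.getLast! + v]) (acc ++ [c]) =
      (acc ++ [c]) ++ sumsFrom c arr := by
  induction arr generalizing acc c with
  | nil => simp [sumsFrom]
  | cons v vs ih =>
    simp only [List.foldl_cons, sumsFrom, getLast_concat']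
    simpa [List.append_assoc] using ih (acc := acc ++ [c]) (c := c + v)

-- ===== VERDICT (by name: the statement is the Claim_ definition above) =====
theorem crossMin_spec : Claim_equal_crossMin := by
  intro arr _
  show crossMin arr = crossMin_alt arr
  simp only [crossMin, crossMin_alt]
  have hhalf : PySem.Int.floordiv ((arr.length : Int)) 2 = ((arr.length / 2 : Nat) : Int) := by
    exact_mod_cast PySem.Int.floordiv_natCast arr.length 2
  set half : Nat := arr.length / 2 with hhdef
  have hle : half ≤ arr.length := Nat.div_le_self _ _
  rw [hhalf]
  -- A: index loops → consStep / fusedStep folds over the value lists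
  have hleftbody :
      (fun (st : Int × Option Int × List Int) (i : Int) =>
        let s := st.1 + PySem.List.pyGetD arr i 0
        match st.2.1 with
        | none => (s, some s, PySem.List.pyGetD arr i 0 :: st.2.2)
        | some m => if s < m then (s, some s, PySem.List.pyGetD arr i 0 :: st.2.2) else (s, some m, st.2.2)) =
      (fun st i => consStep st (PySem.List.pyGetD arr i 0)) := rfl
  have hrightbody :
      (fun (st : Int × Option Int × List Int) (i : Int) =>
        let s := st.1 + PySem.List.pyGetD arr i 0
        match st.2.1 with
        | none => (s, some s, st.2.2 ++ [PySem.List.pyGetD arr i 0])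
        | some m => if s < m then (s, some s, st.2.2 ++ [PySem.List.pyGetD arr i 0]) else (s, some m, st.2.2)) =
      (fun st i => fusedStep st (PySem.List.pyGetD arr i 0)) := rfl
  simp only [hleftbody, hrightbody]
  have hcons : ∀ (L : List Int) (init : Int × Option Int × List Int),
      L.foldl (fun st i => consStep st (PySem.List.pyGetD arr i 0)) init =
        (L.map (fun i => PySem.List.pyGetD arr i 0)).foldl consStep init := by
    intro L init; exact List.foldl_map.symm
  rw [hcons, List.map_reverse, map_getD_range_take arr half hle]
  rw [PySem.List.foldl_pyRange_pyGetD' arr 0 fusedStep _ (by positivity)]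
  rw [fused_acc, cons_eq_rev_fused]
  -- names for the pieces
  set wl : List Int := (arr.take half).reverse with hwl
  set rv : List Int := arr.drop half with hrv
  set c : Int := (arr.take half).sum with hc
  -- B: the prefix table P
  have hP : arr.foldl (fun acc v => acc ++ [acc.getLast! + v]) [0] = 0 :: sumsFrom 0 arr := by
    have := pFold arr [] 0
    simpa using this
  rw [hP]
  -- leftP = dropLast (0 :: sums of the left half)
  have hlen : (sumsFrom (0 : Int) arr).length = arr.length := length_sumsFrom 0 arr
  have hleftP : (0 :: sumsFrom 0 arr).take half = (0 :: sumsFrom 0 (arr.take half)).dropLast := by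
    rw [List.dropLast_eq_take]
    simp only [List.length_cons, length_sumsFrom, List.length_take]
    have hmin : min half arr.length = half := by omega
    rw [hmin]
    cases half with
    | zero => simp
    | succ k =>
      simp only [List.take_succ_cons, Nat.add_sub_cancel, List.cons.injEq, true_and]
      rw [sumsFrom_take, sumsFrom_take, List.take_take]
      have : min k (k + 1) = k := by omega
      rw [this]
  rw [hleftP]
  -- rightP = sumsFrom c rv
  have hright : (0 :: sumsFrom 0 arr).drop (half + 1) = sumsFrom c rv := by
    have hsplit : sumsFrom 0 arr = sumsFrom 0 (arr.take half) ++ sumsFrom (0 + c) rv := by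
      conv_lhs => rw [← List.take_append_drop half arr]
      rw [sumsFrom_append, hc, hrv]
    rw [List.drop_succ_cons, hsplit]
    have hl : (sumsFrom (0:Int) (arr.take half)).length = half := by
      rw [length_sumsFrom, List.length_take]; omega
    rw [List.drop_append_of_le_length hl.symm.le,
        List.drop_eq_nil_of_le hl.le, List.nil_append, zero_add]
  rw [hright]
  -- table folds → hTab
  rw [tab_fold updMax, tab_fold updMin, List.nil_append, List.nil_append]
  -- left-half sums characterization
  have hrevL : ((0 :: sumsFrom 0 (arr.take half)).dropLast).reverse =
      (sumsFrom 0 wl).map (fun s => c - s) := by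
    have := revSums (arr.take half) 0
    rw [this, hwl, hc]
    apply List.map_congr_left
    intro s _
    ring
  -- the right half
  have hR : ((rv.zip ((sumsFrom c rv).zip (hTab updMin none (sumsFrom c rv)))).filterMap
      (fun p => match p.2.2 with | none => some p.1 | some h => if p.2.1 < h then some p.1 else none)) =
      (rv.foldl fusedStep (0, none, [])).2.2 := by
    have hsel : (fun (p : Int × Int × Option Int) =>
        match p.2.2 with | none => some p.1 | some h => if p.2.1 < h then some p.1 else none) = selLT := rfl
    rw [hsel, sumsFrom_ofs c rv]
    have h1 := hTab_min_add (sumsFrom 0 rv) none c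
    simp only [Option.map_none] at h1
    rw [h1, sel_lt_add, fused_table]
    simp
  -- the left half
  have hL : (((arr.take half).zip
        (((0 :: sumsFrom 0 (arr.take half)).dropLast).zip
          ((hTab updMax none (((0 :: sumsFrom 0 (arr.take half)).dropLast).reverse)).reverse))).filterMap
      (fun p => match p.2.2 with | none => some p.1 | some t => if p.2.1 > t then some p.1 else none)) =
      ((wl.foldl fusedStep (0, none, [])).2.2).reverse := by
    have hsel : (fun (p : Int × Int × Option Int) =>
        match p.2.2 with | none => some p.1 | some t => if p.2.1 > t then some p.1 else none) = selGT := rfl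
    rw [hsel]
    -- lengths
    have hlenL : ((0 :: sumsFrom 0 (arr.take half)).dropLast).length = half := by
      simp [List.length_dropLast, length_sumsFrom, List.length_take]; omega
    have hlenT : ((hTab updMax none (((0 :: sumsFrom 0 (arr.take half)).dropLast).reverse)).reverse).length = half := by
      simp [length_hTab, hlenL]
    have hlenV : (arr.take half).length = half := by simp [List.length_take]; omega
    -- reverse both sides
    apply List.reverse_injective
    rw [List.reverse_reverse, ← List.filterMap_reverse]
    rw [zip_rev _ _ (by simp [List.length_zip, hlenL, hlenT, hlenV])]
    rw [zip_rev _ _ (by simp [hlenL, hlenT])]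
    rw [List.reverse_reverse, ← hwl, hrevL]
    have h1 := hTab_max_of_min (sumsFrom 0 wl) none c
    simp only [Option.map_none] at h1
    rw [h1, sel_gt_sub, fused_table]
    simp
  rw [hR, hL]
  simp [hrv]
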